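-- pv_equiv track=rewrite | github.com/linalinalina1/aa_labs | Lab_2/visualisation.py | heapsort_optimized_states
-- ===== SOURCE A (Python) =====
-- from typing import Generator, List, Sequence, Tuple, Optional, Dict, Any
--
-- Frame = Tuple[List[int], List[bool]]  # (array_state, is_sorted_mask)
--
-- def heapsort_optimized_states(arr: Sequence[int]) -> Generator[Frame, None, None]:
--     a = list(arr)
--     n = len(a)
--     fixed = [False] * n
--     yield a[:], fixed[:]
--
--     def sift_down_iterative(root: int, heap_size: int) -> Generator[Frame, None, None]:
--         while True:
--             left = 2 * root + 1
--             right = left + 1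
--             largest = root
--
--             if left < heap_size and a[left] > a[largest]:
--                 largest = left
--             if right < heap_size and a[right] > a[largest]:
--                 largest = right
--
--             if largest == root:
--                 return
--
--             a[root], a[largest] = a[largest], a[root]
--             yield a[:], fixed[:]
--             root = largest
--
--     for i in range(n // 2 - 1, -1, -1):
--         yield from sift_down_iterative(i, n)
--
--     for end in range(n - 1, 0, -1):
--         a[0], a[end] = a[end], a[0]
--         yield a[:], fixed[:]
--         fixed[end] = True
--         yield a[:], fixed[:]
--         yield from sift_down_iterative(0, end)
--
--     if n:
--         fixed[0] = True
--     yield a[:], fixed[:]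
-- ===== SOURCE B (Python) =====
-- def heapsort_optimized_states(arr):
--     # recursive sift-down instead of the iterative while-loop; same frame sequence
--     a = list(arr)
--     n = len(a)
--     fixed = [False] * n
--
--     def sift_down(root, heap_size):
--         left = 2 * root + 1
--         right = 2 * root + 2
--         largest = root
--         if left < heap_size and a[left] > a[largest]:
--             largest = left
--         if right < heap_size and a[right] > a[largest]:
--             largest = right
--         if largest != root:
--             a[root], a[largest] = a[largest], a[root]
--             yield a[:], fixed[:]
--             yield from sift_down(largest, heap_size)
--
--     yield a[:], fixed[:]
--     for i in reversed(range(n // 2)):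
--         yield from sift_down(i, n)
--     for end in range(n - 1, 0, -1):
--         a[0], a[end] = a[end], a[0]
--         yield a[:], fixed[:]
--         fixed[end] = True
--         yield a[:], fixed[:]
--         yield from sift_down(0, end)
--     if n:
--         fixed[0] = True
--     yield a[:], fixed[:]
-- ===== Notes on version B (the rewrite author's own statement) =====
-- stated objective: alternative
-- what changed: The iterative sift_down while-loop with state reassignment is replaced by a structurally recursive sift_down (recurse on the child after the swap); the build loop runs over reversed(range(n//2)) and the extraction recursion assembles frames by concatenation instead of a single mutable generator walk.
import Mathlib
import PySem

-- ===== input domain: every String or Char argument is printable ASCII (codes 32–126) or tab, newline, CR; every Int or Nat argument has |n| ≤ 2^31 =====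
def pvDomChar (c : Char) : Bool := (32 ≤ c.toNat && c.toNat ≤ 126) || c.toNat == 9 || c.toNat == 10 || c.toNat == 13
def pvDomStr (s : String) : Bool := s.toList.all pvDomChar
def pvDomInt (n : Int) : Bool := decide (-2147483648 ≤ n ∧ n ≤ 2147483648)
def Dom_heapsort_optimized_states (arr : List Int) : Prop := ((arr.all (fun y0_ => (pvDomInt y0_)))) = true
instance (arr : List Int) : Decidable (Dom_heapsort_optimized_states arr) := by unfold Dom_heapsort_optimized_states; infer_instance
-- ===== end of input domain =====

-- B replaces A's iterative sift_down while-loop by a structurally recursive sift_down and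
-- assembles the frame list by recursion/concatenation instead of one mutable generator walk
-- (objective: alternative decomposition; same frame sequence).

-- ===== PORT A =====
-- Python tuple swap a[root], a[largest] = a[largest], a[root] (indices in range at every call site)
def pvSwapA (a : List Int) (i j : Nat) : List Int :=
  let x := a.getD i 0
  let y := a.getD j 0
  (a.set i y).set j x

-- the two `if` statements of A's loop body computing `largest` (right = left + 1)
def pvLargestA (a : List Int) (heapSize root : Nat) : Nat :=
  let left := 2 * root + 1
  let right := left + 1
  let l1 := if left < heapSize ∧ a.getD left 0 > a.getD root 0 then left else root
  if right < heapSize ∧ a.getD right 0 > a.getD l1 0 then right else l1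

theorem pvLargestA_bounds (a : List Int) (heapSize root : Nat)
    (h : pvLargestA a heapSize root ≠ root) :
    root < pvLargestA a heapSize root ∧ pvLargestA a heapSize root < heapSize := by
  simp only [pvLargestA] at h ⊢
  split_ifs at h ⊢ with h1 h2 <;> omega

-- A's `sift_down_iterative`: the while-loop as tail recursion over (root, a) with the
-- yielded frames appended to an accumulator, exactly as the generator emits them.
def pvSiftA (fixed : List Bool) (heapSize root : Nat) (a : List Int)
    (acc : List (List Int × List Bool)) : List Int × List (List Int × List Bool) :=
  if h : pvLargestA a heapSize root = root then (a, acc)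
  else
    let a' := pvSwapA a root (pvLargestA a heapSize root)
    pvSiftA fixed heapSize (pvLargestA a heapSize root) a' (acc ++ [(a', fixed)])
termination_by heapSize - root
decreasing_by
  have := pvLargestA_bounds a heapSize root h
  omega

-- A, step for step: initial yield; build loop for i in range(n//2-1,-1,-1) (the indices
-- n/2-1 … 0, i.e. (range (n/2)).reverse); extraction loop for end in range(n-1,0,-1)
-- (the indices n-1 … 1, i.e. (range' 1 (n-1)).reverse); final yield.
def heapsort_optimized_states (arr : List Int) : List (List Int × List Bool) :=
  let n := arr.length
  let fixed := List.replicate n false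
  let st1 := (List.range (n / 2)).reverse.foldl
      (fun (s : List Int × List (List Int × List Bool)) i => pvSiftA fixed n i s.1 s.2)
      (arr, [(arr, fixed)])
  let st2 := (List.range' 1 (n - 1)).reverse.foldl
      (fun (s : List Int × List Bool × List (List Int × List Bool)) e =>
        let a' := pvSwapA s.1 0 e
        let fr1 := s.2.2 ++ [(a', s.2.1)]
        let fixed' := s.2.1.set e true
        let fr2 := fr1 ++ [(a', fixed')]
        let r := pvSiftA fixed' e 0 a' fr2
        (r.1, fixed', r.2))
      (st1.1, fixed, st1.2)
  let fixedF := if n ≠ 0 then st2.2.1.set 0 true else st2.2.1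
  st2.2.2 ++ [(st2.1, fixedF)]

-- ===== PORT B =====
def pvSwapB (a : List Int) (i j : Nat) : List Int :=
  (a.set i (a.getD j 0)).set j (a.getD i 0)

def pvLargestB (a : List Int) (root heapSize : Nat) : Nat :=
  let left := 2 * root + 1
  let right := 2 * root + 2
  let l := if left < heapSize ∧ a.getD left 0 > a.getD root 0 then left else root
  if right < heapSize ∧ a.getD right 0 > a.getD l 0 then right else l

theorem pvLargestB_bounds (a : List Int) (root heapSize : Nat)
    (h : pvLargestB a root heapSize ≠ root) :
    root < pvLargestB a root heapSize ∧ pvLargestB a root heapSize < heapSize := by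
  simp only [pvLargestB] at h ⊢
  split_ifs at h ⊢ with h1 h2 <;> omega

-- B's recursive `sift_down`: swap, emit one frame, recurse on the child; frames are consed.
def pvSiftB (fixed : List Bool) (heapSize root : Nat) (a : List Int) :
    List Int × List (List Int × List Bool) :=
  if h : pvLargestB a root heapSize ≠ root then
    let a' := pvSwapB a root (pvLargestB a root heapSize)
    let r := pvSiftB fixed heapSize (pvLargestB a root heapSize) a'
    (r.1, (a', fixed) :: r.2)
  else (a, [])
termination_by heapSize - root
decreasing_by
  have := pvLargestB_bounds a root heapSize h
  omega

-- B's `for i in reversed(range(n // 2))` as recursion on the counter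
def pvBuildB (fixed : List Bool) (n : Nat) : Nat → List Int → List Int × List (List Int × List Bool)
  | 0, a => (a, [])
  | k + 1, a =>
    let r1 := pvSiftB fixed n k a
    let r2 := pvBuildB fixed n k r1.1
    (r2.1, r1.2 ++ r2.2)

-- B's `for end in range(n - 1, 0, -1)` as recursion on end
def pvExtractB : Nat → List Int → List Bool → List Int × List Bool × List (List Int × List Bool)
  | 0, a, fixed => (a, fixed, [])
  | e + 1, a, fixed =>
    let a' := pvSwapB a 0 (e + 1)
    let fixed' := fixed.set (e + 1) true
    let r := pvSiftB fixed' (e + 1) 0 a'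
    let r2 := pvExtractB e r.1 fixed'
    (r2.1, r2.2.1, (a', fixed) :: (a', fixed') :: (r.2 ++ r2.2.2))

def heapsort_optimized_states_alt (arr : List Int) : List (List Int × List Bool) :=
  let n := arr.length
  let fixed := List.replicate n false
  let r1 := pvBuildB fixed n (n / 2) arr
  let r2 := pvExtractB (n - 1) r1.1 fixed
  let fixedF := if n = 0 then r2.2.1 else r2.2.1.set 0 true
  (arr, fixed) :: (r1.2 ++ (r2.2.2 ++ [(r2.1, fixedF)]))

-- ===== PRECONDITION & SPEC =====
def Spec_heapsort_optimized_states (arr : List Int) (out : List (List Int × List Bool)) : Prop := out = heapsort_optimized_states_alt arr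
instance (arr : List Int) (out : List (List Int × List Bool)) : Decidable (Spec_heapsort_optimized_states arr out) := by unfold Spec_heapsort_optimized_states; infer_instance

-- ===== CLAIM (what is proved, stated in full; the proofs are below) =====
def Claim_equal_heapsort_optimized_states : Prop := ∀ (arr : List Int), Dom_heapsort_optimized_states arr → Spec_heapsort_optimized_states arr (heapsort_optimized_states arr)

-- ===== LEMMAS AND PROOFS =====

theorem pvLargest_eq (a : List Int) (heapSize root : Nat) :
    pvLargestA a heapSize root = pvLargestB a root heapSize := rfl

theorem pvSwap_eq (a : List Int) (i j : Nat) : pvSwapA a i j = pvSwapB a i j := rfl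

-- the iterative and the recursive sift produce the same array and the same frames
theorem pvSift_eq (fixed : List Bool) (heapSize root : Nat) (a : List Int)
    (acc : List (List Int × List Bool)) :
    pvSiftA fixed heapSize root a acc =
      ((pvSiftB fixed heapSize root a).1, acc ++ (pvSiftB fixed heapSize root a).2) := by
  rw [pvSiftA, pvSiftB]
  by_cases h : pvLargestA a heapSize root = root
  · simp [h, pvLargest_eq a heapSize root ▸ h]
  · have hb : pvLargestB a root heapSize ≠ root := by rw [← pvLargest_eq]; exact h
    simp only [h, dif_neg, not_false_iff]
    rw [pvSift_eq, pvLargest_eq, pvSwap_eq]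
    simp [hb]
termination_by heapSize - root
decreasing_by
  have := pvLargestA_bounds a heapSize root h
  omega

theorem pvBuild_eq (fixed : List Bool) (n : Nat) (k : Nat) (a : List Int)
    (acc : List (List Int × List Bool)) :
    (List.range k).reverse.foldl
        (fun (s : List Int × List (List Int × List Bool)) i => pvSiftA fixed n i s.1 s.2)
        (a, acc) =
      ((pvBuildB fixed n k a).1, acc ++ (pvBuildB fixed n k a).2) := by
  induction k generalizing a acc with
  | zero => simp [pvBuildB]
  | succ k ih =>
    rw [List.range_succ]
    simp only [List.reverse_append, List.reverse_cons, List.reverse_nil, List.nil_append,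
      List.cons_append, List.foldl_cons]
    rw [pvSift_eq, ih, pvBuildB]
    simp
  
theorem pvExtract_eq (e : Nat) (a : List Int) (fixed : List Bool)
    (acc : List (List Int × List Bool)) :
    (List.range' 1 e).reverse.foldl
        (fun (s : List Int × List Bool × List (List Int × List Bool)) i =>
          let a' := pvSwapA s.1 0 i
          let fr1 := s.2.2 ++ [(a', s.2.1)]
          let fixed' := s.2.1.set i true
          let fr2 := fr1 ++ [(a', fixed')]
          let r := pvSiftA fixed' i 0 a' fr2
          (r.1, fixed', r.2))
        (a, fixed, acc) =
      ((pvExtractB e a fixed).1, (pvExtractB e a fixed).2.1,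
        acc ++ (pvExtractB e a fixed).2.2) := by
  induction e generalizing a fixed acc with
  | zero => simp [pvExtractB]
  | succ e ih =>
    rw [List.range'_1_concat, Nat.add_comm 1 e]
    simp only [List.reverse_append, List.reverse_cons, List.reverse_nil, List.nil_append,
      List.cons_append, List.foldl_cons]
    rw [pvSift_eq, ih, pvExtractB]
    simp [pvSwap_eq]

-- ===== VERDICT (by name: the statement is the Claim_ definition above) =====
theorem heapsort_optimized_states_spec : Claim_equal_heapsort_optimized_states := by
  intro arr _
  unfold Spec_heapsort_optimized_states heapsort_optimized_states heapsort_optimized_states_alt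
  simp only
  rw [pvBuild_eq, pvExtract_eq]
  by_cases h : arr.length = 0 <;> simp [h]
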